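-- pv_equiv track=rewrite | github.com/KotisKotlyandii/lessons1 | ege22/181.py | f
-- ===== SOURCE A (Python) =====
-- def f(x):
--     k = x % 6
--     a,b = 0,0
--     while x > 0:
--         d = x % 6
--         if d == k:
--             a += 1
--         b += d
--         x //= 6
--     return a,b
-- ===== SOURCE B (Python) =====
-- def f(x):
--     if x <= 0:
--         return 0, 0
--     k = x % 6
--     a, s, p = 0, 0, 1
--     while p <= x:
--         if (x // p) % 6 == k:
--             a += 1
--         p *= 6
--         s += x // p
--     return a, x - 5 * s
-- ===== Notes on version B (the rewrite author's own statement) =====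
-- stated objective: alternative
-- what changed: B never extracts or accumulates digits: it scans positions with a growing power p (x fixed), reading each digit as (x//p)%6 for the count, and obtains the digit sum by the closed-form identity digitsum(x) = x - 5*sum(x//6^i for i>=1), replacing A's destructive mod/div accumulator loop.
import Mathlib
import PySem

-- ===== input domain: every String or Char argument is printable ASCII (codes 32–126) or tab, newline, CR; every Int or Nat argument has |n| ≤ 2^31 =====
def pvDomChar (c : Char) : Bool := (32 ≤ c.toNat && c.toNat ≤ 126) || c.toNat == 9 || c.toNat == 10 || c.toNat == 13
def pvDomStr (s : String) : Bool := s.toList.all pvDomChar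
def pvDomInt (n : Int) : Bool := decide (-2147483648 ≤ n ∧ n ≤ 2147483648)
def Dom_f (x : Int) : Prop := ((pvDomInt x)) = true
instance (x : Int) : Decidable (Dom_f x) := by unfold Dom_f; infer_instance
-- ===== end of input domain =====

-- B scans digit positions with a growing power of 6 (x unchanged) and gets the digit sum from the identity digitsum(x) = x - 5*Σ x//6^i, instead of A's destructive mod/div accumulator loop (alternative algorithm, same cost).


-- ===== PORT A =====
-- while x > 0: d = x % 6; if d == k: a += 1; b += d; x //= 6
def fLoop (x k a b : Int) : Int × Int :=
  if h : x > 0 then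
    fLoop (PySem.Int.floordiv x 6) k
      (if PySem.Int.mod x 6 == k then a + 1 else a) (b + PySem.Int.mod x 6)
  else (a, b)
termination_by x.toNat
decreasing_by
  have h6 : (0:Int) < 6 := by norm_num
  have := PySem.Int.floordiv_eq_ediv_of_pos (a := x) h6
  omega

def f (x : Int) : Int × Int := fLoop x (PySem.Int.mod x 6) 0 0

-- ===== PORT B =====
-- while p <= x: if (x // p) % 6 == k: a += 1; p *= 6; s += x // p
-- (hp is a termination-only proof argument; p starts at 1 and is multiplied by 6)
def gLoop (x k a s p : Int) (hp : 0 < p) : Int × Int :=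
  if h : p ≤ x then
    gLoop x k
      (if PySem.Int.mod (PySem.Int.floordiv x p) 6 == k then a + 1 else a)
      (s + PySem.Int.floordiv x (p * 6)) (p * 6) (by positivity)
  else (a, s)
termination_by (x + 1 - p).toNat
decreasing_by omega

def f_alt (x : Int) : Int × Int :=
  if x ≤ 0 then (0, 0)
  else
    let r := gLoop x (PySem.Int.mod x 6) 0 0 1 (by norm_num)
    (r.1, x - 5 * r.2)

-- ===== PRECONDITION & SPEC =====
def Spec_f (x : Int) (out : Int × Int) : Prop := out = f_alt x
instance (x : Int) (out : Int × Int) : Decidable (Spec_f x out) := by unfold Spec_f; infer_instance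

-- ===== CLAIM (what is proved, stated in full; the proofs are below) =====
def Claim_equal_f : Prop := ∀ (x : Int), Dom_f x → Spec_f x (f x)

-- ===== LEMMAS AND PROOFS =====

-- base-6 digits of x, least significant first (proof-side abstraction)
def pvDigits (x : Int) : List Int :=
  if h : x > 0 then
    PySem.Int.mod x 6 :: pvDigits (PySem.Int.floordiv x 6)
  else []
termination_by x.toNat
decreasing_by
  have h6 : (0:Int) < 6 := by norm_num
  have := PySem.Int.floordiv_eq_ediv_of_pos (a := x) h6
  omega

-- Σ_{j≥1} x // (p·6^j), the quantity B's s accumulates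
def pvS (x p : Int) (hp : 0 < p) : Int :=
  if h : p ≤ x then PySem.Int.floordiv x (p * 6) + pvS x (p * 6) (by positivity)
  else 0
termination_by (x + 1 - p).toNat
decreasing_by omega

theorem fLoop_eq_digits (x k a b : Int) :
    fLoop x k a b = (a + ((pvDigits x).count k : Int), b + (pvDigits x).sum) := by
  induction x, a, b using fLoop.induct k with
  | case1 x a b h ih =>
    rw [fLoop, dif_pos h, pvDigits, dif_pos h]
    simp only [dite_eq_ite] at ih
    rw [ih]
    simp only [List.count_cons, List.sum_cons, beq_iff_eq]
    split_ifs with hd <;> simp only [Prod.mk.injEq] <;> constructor <;> push_cast <;> ring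
  | case2 x a b h =>
    rw [fLoop, dif_neg h, pvDigits, dif_neg h]
    simp

theorem floordiv_floordiv (x p : Int) (_hx : 0 ≤ x) (hp : 0 < p) :
    PySem.Int.floordiv (PySem.Int.floordiv x p) 6 = PySem.Int.floordiv x (p * 6) := by
  rw [PySem.Int.floordiv_eq_ediv_of_pos hp, PySem.Int.floordiv_eq_ediv_of_pos (by norm_num),
      PySem.Int.floordiv_eq_ediv_of_pos (by positivity)]
  rw [Int.ediv_ediv_of_nonneg hp.le]

theorem gLoop_eq (x : Int) (hx : 0 ≤ x) (k : Int) (p : Int) (hp : 0 < p) (a s : Int) :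
      gLoop x k a s p hp =
        (a + ((pvDigits (PySem.Int.floordiv x p)).count k : Int), s + pvS x p hp) := by
  induction hn : (x + 1 - p).toNat using Nat.strong_induction_on generalizing p a s with
  | _ n ih =>
  by_cases h : p ≤ x
  · rw [gLoop.eq_def, dif_pos h, pvS.eq_def, dif_pos h,
        ih ((x + 1 - p * 6).toNat) (by omega) (p * 6) (by positivity) _ _ rfl]
    have hq1 : (1:Int) ≤ PySem.Int.floordiv x p := by
      rw [PySem.Int.floordiv_eq_ediv_of_pos hp]
      exact (Int.le_ediv_iff_mul_le hp).mpr (by omega)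
    have hexp : pvDigits (PySem.Int.floordiv x p) =
        PySem.Int.mod (PySem.Int.floordiv x p) 6 :: pvDigits (PySem.Int.floordiv x (p * 6)) := by
      rw [pvDigits, dif_pos (by omega), floordiv_floordiv x p hx hp]
    rw [hexp]
    simp only [List.count_cons, beq_iff_eq]
    split_ifs with hd <;> simp only [Prod.mk.injEq] <;> constructor <;> push_cast <;> ring
  · rw [gLoop.eq_def, dif_neg h, pvS.eq_def, dif_neg h]
    have hq : PySem.Int.floordiv x p = 0 := by
      rw [PySem.Int.floordiv_eq_ediv_of_pos hp]
      exact Int.ediv_eq_zero_of_lt hx (by omega)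
    rw [hq, pvDigits, dif_neg (by norm_num)]
    simp

theorem pvS_eq (x : Int) (hx : 0 ≤ x) (p : Int) (hp : 0 < p) :
      5 * pvS x p hp = PySem.Int.floordiv x p - (pvDigits (PySem.Int.floordiv x p)).sum := by
  induction hn : (x + 1 - p).toNat using Nat.strong_induction_on generalizing p with
  | _ n ih =>
  by_cases h : p ≤ x
  · rw [pvS.eq_def, dif_pos h]
    have hq1 : (1:Int) ≤ PySem.Int.floordiv x p := by
      rw [PySem.Int.floordiv_eq_ediv_of_pos hp]
      exact (Int.le_ediv_iff_mul_le hp).mpr (by omega)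
    have hdd : PySem.Int.floordiv x (p * 6) = PySem.Int.floordiv (PySem.Int.floordiv x p) 6 :=
      (floordiv_floordiv x p hx hp).symm
    rw [pvDigits, dif_pos (by omega)]
    have hqm := PySem.Int.floordiv_mul_add_mod (PySem.Int.floordiv x p) 6
    have ih' := ih ((x + 1 - p * 6).toNat) (by omega) (p * 6) (by positivity) rfl
    rw [hdd] at ih'
    simp only [List.sum_cons]
    omega
  · rw [pvS.eq_def, dif_neg h]
    have hq : PySem.Int.floordiv x p = 0 := by
      rw [PySem.Int.floordiv_eq_ediv_of_pos hp]
      exact Int.ediv_eq_zero_of_lt hx (by omega)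
    rw [hq, pvDigits, dif_neg (by norm_num)]
    simp

theorem f_spec : Claim_equal_f := by
  intro x _
  unfold Spec_f f
  by_cases hx : x ≤ 0
  · simp only [f_alt, if_pos hx]
    rw [fLoop, dif_neg (by omega)]
  · simp only [f_alt, if_neg hx]
    have hx0 : (0:Int) ≤ x := by omega
    have h1 : PySem.Int.floordiv x 1 = x := by
      rw [PySem.Int.floordiv_eq_ediv_of_pos (by norm_num), Int.ediv_one]
    have hs := pvS_eq x hx0 1 (by norm_num)
    rw [h1] at hs
    rw [fLoop_eq_digits, gLoop_eq x hx0 _ 1 (by norm_num) 0 0]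
    simp only [h1, zero_add, Prod.mk.injEq]
    exact ⟨trivial, by omega⟩
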